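-- pv_equiv track=rewrite | github.com/antoniuv/AA | main.py | mutatie
-- ===== SOURCE A (Python) =====
-- def mutatie(cromozom, pozitii):
--     mutatie = ""
--     for i in range(len(cromozom)):
--         if cromozom[i] == "0" and i in pozitii and pozitii.count(i) % 2 == 1:
--             mutatie += "1"
--         elif cromozom[i] == "1" and i in pozitii and pozitii.count(i) % 2 == 1:
--             mutatie += "0"
--         else:
--             mutatie += cromozom[i]
--     return mutatie
-- ===== SOURCE B (Python) =====
-- def mutatie(cromozom, pozitii):
--     counts = {}
--     for p in pozitii:
--         counts[p] = counts.get(p, 0) + 1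
--     chars = list(cromozom)
--     for i, c in counts.items():
--         if c % 2 == 1 and 0 <= i < len(chars):
--             if chars[i] == "0":
--                 chars[i] = "1"
--             elif chars[i] == "1":
--                 chars[i] = "0"
--     return "".join(chars)
-- ===== Notes on version B (the rewrite author's own statement) =====
-- stated objective: alternative
-- what changed: Instead of scanning every character and re-counting pozitii for each (membership test plus count), B builds a count dictionary over pozitii in one pass and then flips chars in place only at the distinct in-range positions with an odd count, joining at the end.
import Mathlib
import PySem

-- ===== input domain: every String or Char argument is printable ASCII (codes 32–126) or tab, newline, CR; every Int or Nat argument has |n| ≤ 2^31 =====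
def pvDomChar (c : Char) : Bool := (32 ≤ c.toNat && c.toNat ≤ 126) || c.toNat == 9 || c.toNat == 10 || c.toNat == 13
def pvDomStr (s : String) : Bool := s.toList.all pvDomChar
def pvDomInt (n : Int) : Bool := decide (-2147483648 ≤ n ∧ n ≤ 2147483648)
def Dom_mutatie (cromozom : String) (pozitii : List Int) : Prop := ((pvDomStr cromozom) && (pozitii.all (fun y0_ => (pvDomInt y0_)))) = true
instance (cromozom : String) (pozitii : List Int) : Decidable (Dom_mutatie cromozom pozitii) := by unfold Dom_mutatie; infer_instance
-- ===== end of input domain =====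

-- B replaces A's per-character scan (which re-counts pozitii for every character) by one counting
-- pass over pozitii followed by in-place flips at the distinct odd-count positions (objective: alternative).

-- ===== PORT A =====
def mutatie (cromozom : String) (pozitii : List Int) : String :=
  String.mk ((List.range cromozom.toList.length).foldl (fun acc i =>
    if cromozom.toList.getD i ' ' = '0' ∧ (i : Int) ∈ pozitii ∧ pozitii.count (i : Int) % 2 = 1 then acc ++ ['1']
    else if cromozom.toList.getD i ' ' = '1' ∧ (i : Int) ∈ pozitii ∧ pozitii.count (i : Int) % 2 = 1 then acc ++ ['0']
    else acc ++ [cromozom.toList.getD i ' ']) [])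

-- ===== PORT B =====
def mutatie_alt (cromozom : String) (pozitii : List Int) : String :=
  String.mk ((pozitii.foldl (fun d p => d.insert p (d.getD p 0 + 1)) (PySem.Dict.empty : PySem.Dict Int Int)).items.foldl (fun cs pc =>
    if PySem.Int.mod pc.2 2 = 1 ∧ 0 ≤ pc.1 ∧ pc.1 < (cs.length : Int) then
      if cs.getD pc.1.toNat ' ' = '0' then cs.set pc.1.toNat '1'
      else if cs.getD pc.1.toNat ' ' = '1' then cs.set pc.1.toNat '0'
      else cs
    else cs) cromozom.toList)

-- ===== PRECONDITION & SPEC =====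
def Spec_mutatie (cromozom : String) (pozitii : List Int) (out : String) : Prop := out = mutatie_alt cromozom pozitii
instance (cromozom : String) (pozitii : List Int) (out : String) : Decidable (Spec_mutatie cromozom pozitii out) := by unfold Spec_mutatie; infer_instance

-- ===== CLAIM (what is proved, stated in full; the proofs are below) =====
def Claim_equal_mutatie : Prop := ∀ (cromozom : String) (pozitii : List Int), Dom_mutatie cromozom pozitii → Spec_mutatie cromozom pozitii (mutatie cromozom pozitii)

-- ===== LEMMAS AND PROOFS =====

/-- The flip a single odd-count position performs on a character. -/
def flipc (c : Char) : Char := if c = '0' then '1' else if c = '1' then '0' else c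

/-- Per-index result character, shared characterisation of both programs. -/
def gchar (pozitii : List Int) (cs : List Char) (j : Nat) : Char :=
  if pozitii.count (j : Int) % 2 = 1 then flipc (cs.getD j ' ') else cs.getD j ' '

/-- A's fold equals the pointwise map. -/
theorem mutatie_eq_map (cromozom : String) (pozitii : List Int) :
    mutatie cromozom pozitii =
      String.mk ((List.range cromozom.toList.length).map (gchar pozitii cromozom.toList)) := by
  unfold mutatie
  congr 1
  have h : (fun (acc : List Char) (i : Nat) =>
      if cromozom.toList.getD i ' ' = '0' ∧ (i : Int) ∈ pozitii ∧ pozitii.count (i : Int) % 2 = 1 then acc ++ ['1']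
      else if cromozom.toList.getD i ' ' = '1' ∧ (i : Int) ∈ pozitii ∧ pozitii.count (i : Int) % 2 = 1 then acc ++ ['0']
      else acc ++ [cromozom.toList.getD i ' ']) =
      (fun acc i => acc ++ [gchar pozitii cromozom.toList i]) := by
    funext acc i
    unfold gchar flipc
    have hmem : pozitii.count (i : Int) % 2 = 1 → (i : Int) ∈ pozitii := by
      intro h
      have : 0 < pozitii.count (i : Int) := by omega
      exact List.count_pos_iff.mp this
    split_ifs with h1 h2 h3 h4 h5 h6 h7 <;> simp_all
  rw [h, PySem.List.foldl_append_singleton_eq_map]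
  simp

/-- The generic flip step of B's second loop. -/
def bstep (pred : Int → Bool) (cs : List Char) (k : Int) : List Char :=
  if pred k = true ∧ 0 ≤ k ∧ k < (cs.length : Int) then
    if cs.getD k.toNat ' ' = '0' then cs.set k.toNat '1'
    else if cs.getD k.toNat ' ' = '1' then cs.set k.toNat '0'
    else cs
  else cs

theorem bstep_get?_ne (pred : Int → Bool) (cs : List Char) (k : Int) (j : Nat)
    (h : (j : Int) ≠ k) : (bstep pred cs k)[j]? = cs[j]? := by
  unfold bstep
  have hj : ∀ h0 : 0 ≤ k, k.toNat ≠ j := by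
    intro h0 he
    exact h (by omega)
  split_ifs with h1 h2 h3 <;>
    first
    | rfl
    | rw [List.getElem?_set_ne (by exact fun he => hj h1.2.1 he)]

theorem bstep_get?_self (pred : Int → Bool) (cs : List Char) (j : Nat)
    (hp : pred (j : Int) = true) :
    (bstep pred cs (j : Int))[j]? = (cs[j]?).map flipc := by
  unfold bstep
  have ht : ((j : Int)).toNat = j := by omega
  by_cases hlt : j < cs.length
  · have hg : cs.getD j ' ' = cs[j] := List.getD_eq_getElem cs ' ' hlt
    rw [if_pos ⟨hp, by omega, by exact_mod_cast hlt⟩, ht]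
    unfold flipc
    split_ifs with h1 h2 <;>
      simp_all
  · rw [if_neg (fun h => by have := h.2.2; omega)]
    have hn : cs[j]? = none := by rw [List.getElem?_eq_none_iff]; omega
    rw [hn]; rfl

theorem foldl_bstep_get? (pred : Int → Bool) (S : List Int) (hnd : S.Nodup) :
    ∀ (cs : List Char) (j : Nat),
      (S.foldl (bstep pred) cs)[j]? =
        if (j : Int) ∈ S ∧ pred (j : Int) = true then (cs[j]?).map flipc else cs[j]? := by
  induction S with
  | nil => intro cs j; simp
  | cons k S ih =>
    intro cs j
    have hnd' : S.Nodup := hnd.of_cons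
    have hk : k ∉ S := (List.nodup_cons.mp hnd).1
    rw [List.foldl_cons, ih hnd']
    by_cases hjk : (j : Int) = k
    · subst hjk
      by_cases hp : pred (j : Int) = true
      · have hnotS : ¬((j : Int) ∈ S) := hk
        rw [if_neg (by tauto)]
        simp only [List.mem_cons, true_or, hp, and_true, if_pos trivial]
        exact bstep_get?_self pred cs j hp
      · rw [if_neg (by tauto), if_neg (by simp [hp])]
        unfold bstep
        rw [if_neg (by simp [hp])]
    · have h1 : (bstep pred cs k)[j]? = cs[j]? := bstep_get?_ne pred cs k j hjk
      by_cases hc : (j : Int) ∈ S ∧ pred (j : Int) = true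
      · rw [if_pos hc, if_pos ⟨List.mem_cons_of_mem _ hc.1, hc.2⟩, h1]
      · rw [if_neg hc, h1, if_neg ?_]
        rintro ⟨hm, hp⟩
        rcases List.mem_cons.mp hm with h | h
        · exact hjk h
        · exact hc ⟨h, hp⟩

/-- B's fold equals the same pointwise map. -/
theorem mutatie_alt_eq_map (cromozom : String) (pozitii : List Int) :
    mutatie_alt cromozom pozitii =
      String.mk ((List.range cromozom.toList.length).map (gchar pozitii cromozom.toList)) := by
  unfold mutatie_alt
  congr 1
  set cs := cromozom.toList with hcs
  set pred : Int → Bool := fun k => decide (PySem.Int.mod ((pozitii.count k : Int)) 2 = 1) with hpred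
  rw [PySem.Dict.foldl_insert_getD_add_one_eq_counter, PySem.Dict.items_counter, List.foldl_map]
  have hstep : (fun (cs : List Char) (k : Int) =>
      if PySem.Int.mod ((k, (pozitii.count k : Int)).2 : Int) 2 = 1 ∧ 0 ≤ (k, (pozitii.count k : Int)).1 ∧ (k, (pozitii.count k : Int)).1 < (cs.length : Int) then
        if cs.getD (k, (pozitii.count k : Int)).1.toNat ' ' = '0' then cs.set (k, (pozitii.count k : Int)).1.toNat '1'
        else if cs.getD (k, (pozitii.count k : Int)).1.toNat ' ' = '1' then cs.set (k, (pozitii.count k : Int)).1.toNat '0'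
        else cs
      else cs) = bstep pred := by
    funext cs k
    unfold bstep
    simp [hpred]
  rw [hstep]
  apply List.ext_getElem?
  intro j
  rw [foldl_bstep_get? pred _ (PySem.Set.nodup_ofList pozitii) cs j]
  have hpredj : pred (j : Int) = true ↔ pozitii.count (j : Int) % 2 = 1 := by
    simp [hpred]
    constructor
    · intro h; exact_mod_cast h
    · intro h; exact_mod_cast h
  have hmemS : (j : Int) ∈ PySem.Set.ofList pozitii ↔ (j : Int) ∈ pozitii :=
    PySem.Set.mem_ofList pozitii _
  by_cases hodd : pozitii.count (j : Int) % 2 = 1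
  · have hmem : (j : Int) ∈ pozitii := List.count_pos_iff.mp (by omega)
    rw [if_pos ⟨hmemS.mpr hmem, hpredj.mpr hodd⟩]
    by_cases hlt : j < cs.length
    · rw [List.getElem?_map, List.getElem?_range hlt, List.getElem?_eq_getElem hlt]
      simp [gchar, hodd, List.getElem?_eq_getElem hlt]
    · rw [List.getElem?_eq_none_iff.mpr (by simpa using hlt),
        List.getElem?_eq_none_iff.mpr (by simp; omega)]
      rfl
  · rw [if_neg (by intro h; exact hodd (hpredj.mp h.2))]
    by_cases hlt : j < cs.length
    · rw [List.getElem?_map, List.getElem?_range hlt, List.getElem?_eq_getElem hlt]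
      simp [gchar, hodd, List.getElem?_eq_getElem hlt]
    · rw [List.getElem?_eq_none_iff.mpr (by simpa using hlt),
        List.getElem?_eq_none_iff.mpr (by simp; omega)]

-- ===== VERDICT (by name: the statement is the Claim_ definition above) =====
theorem mutatie_spec : Claim_equal_mutatie := by
  intro cromozom pozitii _
  unfold Spec_mutatie
  rw [mutatie_eq_map, mutatie_alt_eq_map]
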